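-- pv_equiv track=rewrite | github.com/MiguelAngelCaballeroGarcia/muzero-graphdrawing | games/GraphDrawing/graph_drawing.py | _canonical_edges
-- ===== SOURCE A (Python) =====
-- from typing import Dict, Tuple, List, Set, Iterable, Optional
--
-- def _canonical_edges(
--     edges: Iterable[Tuple[int, int]]
-- ) -> List[Tuple[int, int]]:
--     """
--     Return canonical undirected edges u < v with duplicates removed.
--     This ensures that the internal representation is stable.
--     """
--     canon: Set[Tuple[int, int]] = set()
--     for u, v in edges:
--         if u == v:
--             continue  # ignore self-loops
--         u2, v2 = (u, v) if u < v else (v, u)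
--         canon.add((u2, v2))
--     return sorted(canon)
-- ===== SOURCE B (Python) =====
-- from typing import Dict, Tuple, List, Set, Iterable, Optional
--
--
-- def _merge(a: List[Tuple[int, int]], b: List[Tuple[int, int]]) -> List[Tuple[int, int]]:
--     """Merge two strictly increasing lists; equal heads are emitted once (fused dedup)."""
--     out: List[Tuple[int, int]] = []
--     i = j = 0
--     while i < len(a) and j < len(b):
--         if a[i] < b[j]:
--             out.append(a[i]); i += 1
--         elif b[j] < a[i]:
--             out.append(b[j]); j += 1
--         else:
--             out.append(a[i]); i += 1; j += 1
--     out.extend(a[i:])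
--     out.extend(b[j:])
--     return out
--
--
-- def _merge_sort(xs: List[Tuple[int, int]]) -> List[Tuple[int, int]]:
--     if len(xs) <= 1:
--         return list(xs)
--     mid = len(xs) // 2
--     return _merge(_merge_sort(xs[:mid]), _merge_sort(xs[mid:]))
--
--
-- def _canonical_edges(
--     edges: Iterable[Tuple[int, int]]
-- ) -> List[Tuple[int, int]]:
--     """Hand-written recursive merge sort whose merge step removes duplicates:
--     no set and no library sort; duplicates meet in some merge and are emitted once."""
--     pairs = [(u, v) if u < v else (v, u) for u, v in edges if u != v]
--     return _merge_sort(pairs)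
-- ===== Notes on version B (the rewrite author's own statement) =====
-- stated objective: alternative
-- what changed: Replaces the hash-set accumulation plus library sorted() by a hand-written recursive merge sort over the canonicalized pair list whose merge step fuses deduplication (equal heads are emitted once), so no set and no library sort appear anywhere.
import Mathlib
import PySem

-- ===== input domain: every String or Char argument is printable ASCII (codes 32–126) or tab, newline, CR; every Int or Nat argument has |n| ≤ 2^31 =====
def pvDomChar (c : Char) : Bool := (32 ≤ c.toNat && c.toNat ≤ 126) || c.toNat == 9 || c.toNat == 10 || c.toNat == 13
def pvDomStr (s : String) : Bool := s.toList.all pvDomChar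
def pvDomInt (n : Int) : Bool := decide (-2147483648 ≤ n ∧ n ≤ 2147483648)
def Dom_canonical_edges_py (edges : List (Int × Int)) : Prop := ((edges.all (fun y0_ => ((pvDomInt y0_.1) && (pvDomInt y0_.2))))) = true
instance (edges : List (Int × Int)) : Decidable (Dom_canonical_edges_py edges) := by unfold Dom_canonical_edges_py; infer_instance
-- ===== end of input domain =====

-- B replaces A's hash-set dedup + library sort by a hand-written recursive merge sort whose
-- merge step fuses deduplication (equal heads emitted once); objective: alternative.

-- ===== PORT A =====
-- canon = set(); for u, v in edges: skip self-loops, add the ordered pair; return sorted(canon)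
def canonical_edges_py (edges : List (Int × Int)) : List (Int × Int) :=
  let canon : PySem.Set (Int × Int) :=
    edges.foldl (fun canon uv =>
      if uv.1 = uv.2 then canon
      else PySem.Set.add canon (if uv.1 < uv.2 then (uv.1, uv.2) else (uv.2, uv.1)))
      PySem.Set.empty
  PySem.List.sorted2 canon (fun p => p.1) (fun p => p.2) false

-- ===== PORT B =====
-- Python tuple comparison a[i] < b[j] for pairs of ints: lexicographic (exact for 2-tuples of ints)
def pvLexLt (a b : Int × Int) : Bool := decide (a.1 < b.1) || (a.1 == b.1 && decide (a.2 < b.2))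

-- _merge: the while loop over indices i, j building `out` front-to-back, equal heads emitted
-- once; the two trailing `out.extend` calls are the leftover-list branches.
def pvMergeB : List (Int × Int) → List (Int × Int) → List (Int × Int)
  | [], b => b
  | x :: a, [] => x :: a
  | x :: a, y :: b =>
    if pvLexLt x y then x :: pvMergeB a (y :: b)
    else if pvLexLt y x then y :: pvMergeB (x :: a) b
    else x :: pvMergeB a b

-- _merge_sort: xs[:mid] / xs[mid:] with mid = len(xs)//2 ≥ 0 are exactly take/drop
def pvMergeSortB (xs : List (Int × Int)) : List (Int × Int) :=
  if xs.length ≤ 1 then xs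
  else
    let mid := xs.length / 2
    pvMergeB (pvMergeSortB (xs.take mid)) (pvMergeSortB (xs.drop mid))
termination_by xs.length
decreasing_by
  · simp only [List.length_take]; omega
  · simp only [List.length_drop]; omega

-- pairs = [(u,v) if u<v else (v,u) for u,v in edges if u!=v]; return _merge_sort(pairs)
def canonical_edges_py_alt (edges : List (Int × Int)) : List (Int × Int) :=
  pvMergeSortB
    (edges.filterMap (fun uv =>
      if uv.1 = uv.2 then none
      else some (if uv.1 < uv.2 then (uv.1, uv.2) else (uv.2, uv.1))))

-- ===== PRECONDITION & SPEC =====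
def Spec_canonical_edges_py (edges : List (Int × Int)) (out : List (Int × Int)) : Prop := out = canonical_edges_py_alt edges
instance (edges : List (Int × Int)) (out : List (Int × Int)) : Decidable (Spec_canonical_edges_py edges out) := by unfold Spec_canonical_edges_py; infer_instance

-- ===== CLAIM (what is proved, stated in full; the proofs are below) =====
def Claim_equal_canonical_edges_py : Prop := ∀ (edges : List (Int × Int)), Dom_canonical_edges_py edges → Spec_canonical_edges_py edges (canonical_edges_py edges)

-- ===== LEMMAS AND PROOFS =====

-- the canonicalizing projection used by both proofs
def pvCanon (uv : Int × Int) : Option (Int × Int) :=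
  if uv.1 = uv.2 then none
  else some (if uv.1 < uv.2 then (uv.1, uv.2) else (uv.2, uv.1))

-- A's loop builds exactly set(filterMap pvCanon edges)
theorem pvFoldA_eq (edges : List (Int × Int)) (acc : PySem.Set (Int × Int)) :
    edges.foldl (fun canon uv =>
      if uv.1 = uv.2 then canon
      else PySem.Set.add canon (if uv.1 < uv.2 then (uv.1, uv.2) else (uv.2, uv.1))) acc
    = (edges.filterMap pvCanon).foldl PySem.Set.add acc := by
  induction edges generalizing acc with
  | nil => rfl
  | cons uv t ih =>
    rw [List.foldl_cons, ih]
    by_cases h : uv.1 = uv.2 <;> simp [pvCanon, h]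

-- sorted2's `before` is the strict lexicographic comparison
theorem pvBefore_eq :
    (fun (a b : Int × Int) => decide (a.1 < b.1) || (!decide (b.1 < a.1) && decide (a.2 < b.2)))
    = (fun (a b : Int × Int) => decide (toLex a < toLex b)) := by
  funext a b
  rcases lt_trichotomy a.1 b.1 with h | h | h <;>
    simp [Prod.Lex.toLex_lt_toLex, h, not_lt_of_gt]

theorem pvFoldl_insertBy_pairwise (xs acc : List (Int × Int))
    (hacc : acc.Pairwise (fun a b => toLex a ≤ toLex b)) :
    (xs.foldl (fun acc x =>
      PySem.List.insertBy (fun a b => decide (toLex a < toLex b)) x acc) acc).Pairwise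
      (fun a b => toLex a ≤ toLex b) := by
  induction xs generalizing acc with
  | nil => exact hacc
  | cons x t ih =>
    exact ih _ (PySem.List.insertBy_pairwise_le (fun p : Int × Int => toLex p) x acc hacc)

theorem pvSorted2_pairwise (xs : List (Int × Int)) :
    (PySem.List.sorted2 xs (fun p => p.1) (fun p => p.2) false).Pairwise
      (fun a b => toLex a ≤ toLex b) := by
  show (xs.foldl (fun acc x =>
      PySem.List.insertBy
        (fun a b => decide (a.1 < b.1) || (!decide (b.1 < a.1) && decide (a.2 < b.2))) x acc)
      []).Pairwise _
  rw [pvBefore_eq]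
  exact pvFoldl_insertBy_pairwise xs [] List.Pairwise.nil

theorem pvLexLt_iff (a b : Int × Int) : pvLexLt a b = true ↔ toLex a < toLex b := by
  simp [pvLexLt, Prod.Lex.toLex_lt_toLex]

-- merge of two strictly increasing lists is strictly increasing with union membership
theorem pvMergeB_spec (a : List (Int × Int)) : ∀ b : List (Int × Int),
    a.Pairwise (fun p q => toLex p < toLex q) →
    b.Pairwise (fun p q => toLex p < toLex q) →
    (pvMergeB a b).Pairwise (fun p q => toLex p < toLex q) ∧
      (∀ x, x ∈ pvMergeB a b ↔ x ∈ a ∨ x ∈ b) := by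
  induction a with
  | nil => intro b _ hb; exact ⟨by simpa [pvMergeB] using hb, by simp [pvMergeB]⟩
  | cons x a' iha =>
    intro b
    induction b with
    | nil => intro ha _; exact ⟨by simpa [pvMergeB] using ha, by simp [pvMergeB]⟩
    | cons y b' ihb =>
      intro ha hb
      obtain ⟨hx, ha'⟩ := List.pairwise_cons.mp ha
      obtain ⟨hy, hb'⟩ := List.pairwise_cons.mp hb
      by_cases h1 : pvLexLt x y = true
      · -- x < y : emit x
        have hxy := (pvLexLt_iff x y).mp h1
        have IH := iha (y :: b') ha' hb
        refine ⟨?_, ?_⟩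
        · rw [pvMergeB, if_pos h1, List.pairwise_cons]
          refine ⟨fun z hz => ?_, IH.1⟩
          rcases (IH.2 z).mp hz with h | h
          · exact hx z h
          · rcases List.mem_cons.mp h with rfl | h
            · exact hxy
            · exact hxy.trans (hy z h)
        · intro z; rw [pvMergeB, if_pos h1]
          simp only [List.mem_cons, IH.2 z, List.mem_cons]; tauto
      · by_cases h2 : pvLexLt y x = true
        · -- y < x : emit y
          have hyx := (pvLexLt_iff y x).mp h2
          have IH := ihb ha hb'
          refine ⟨?_, ?_⟩
          · rw [pvMergeB, if_neg h1, if_pos h2, List.pairwise_cons]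
            refine ⟨fun z hz => ?_, IH.1⟩
            rcases (IH.2 z).mp hz with h | h
            · rcases List.mem_cons.mp h with rfl | h
              · exact hyx
              · exact hyx.trans (hx z h)
            · exact hy z h
          · intro z; rw [pvMergeB, if_neg h1, if_pos h2]
            simp only [List.mem_cons, IH.2 z, List.mem_cons]; tauto
        · -- x = y : emit once, advance both
          have hxy : toLex x = toLex y := by
            have n1 := (not_iff_not.mpr (pvLexLt_iff x y)).mp h1
            have n2 := (not_iff_not.mpr (pvLexLt_iff y x)).mp h2
            exact le_antisymm (not_lt.mp n2) (not_lt.mp n1)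
          have hxyeq : x = y := toLex.injective hxy
          have IH := iha b' ha' hb'
          refine ⟨?_, ?_⟩
          · rw [pvMergeB, if_neg h1, if_neg h2, List.pairwise_cons]
            refine ⟨fun z hz => ?_, IH.1⟩
            rcases (IH.2 z).mp hz with h | h
            · exact hx z h
            · rw [hxy]; exact hy z h
          · intro z; rw [pvMergeB, if_neg h1, if_neg h2]
            simp only [List.mem_cons, IH.2 z]
            subst hxyeq; tauto

-- merge sort output is strictly increasing with the same members as the input
theorem pvMergeSortB_spec (xs : List (Int × Int)) :
    (pvMergeSortB xs).Pairwise (fun p q => toLex p < toLex q) ∧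
      (∀ x, x ∈ pvMergeSortB xs ↔ x ∈ xs) := by
  by_cases h : xs.length ≤ 1
  · rw [pvMergeSortB, if_pos h]
    refine ⟨?_, fun x => Iff.rfl⟩
    match xs, h with
    | [], _ => exact List.Pairwise.nil
    | [a], _ => exact List.pairwise_singleton _ _
  · rw [pvMergeSortB, if_neg h]
    have IH1 := pvMergeSortB_spec (xs.take (xs.length / 2))
    have IH2 := pvMergeSortB_spec (xs.drop (xs.length / 2))
    have M := pvMergeB_spec _ _ IH1.1 IH2.1
    refine ⟨M.1, fun x => ?_⟩
    rw [M.2 x, IH1.2 x, IH2.2 x, ← List.mem_append, List.take_append_drop]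
termination_by xs.length
decreasing_by
  · simp only [List.length_take]; omega
  · simp only [List.length_drop]; omega

-- ===== VERDICT (by name: the statement is the Claim_ definition above) =====
theorem canonical_edges_py_spec : Claim_equal_canonical_edges_py := by
  intro edges _
  unfold Spec_canonical_edges_py canonical_edges_py canonical_edges_py_alt
  set L := edges.filterMap pvCanon with hL
  have hfold : (edges.foldl (fun canon uv =>
      if uv.1 = uv.2 then canon
      else PySem.Set.add canon (if uv.1 < uv.2 then (uv.1, uv.2) else (uv.2, uv.1)))
      PySem.Set.empty) = PySem.Set.ofList L := by
    rw [PySem.Set.ofList_eq_foldl]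
    exact pvFoldA_eq edges PySem.Set.empty
  have hLeq : edges.filterMap (fun uv =>
      if uv.1 = uv.2 then none
      else some (if uv.1 < uv.2 then (uv.1, uv.2) else (uv.2, uv.1))) = L := rfl
  rw [hfold, hLeq]
  set S := PySem.Set.ofList L with hS
  set sA := PySem.List.sorted2 S (fun p => p.1) (fun p => p.2) false with hsA
  have hApairwise : sA.Pairwise (fun a b => toLex a ≤ toLex b) := pvSorted2_pairwise S
  have hAperm : sA.Perm S := PySem.List.sorted2_perm S _ _ false
  have hAnodup : sA.Nodup := hAperm.nodup_iff.mpr (PySem.Set.nodup_ofList L)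
  have hB := pvMergeSortB_spec L
  set B := pvMergeSortB L with hBdef
  have hBpairwise : B.Pairwise (fun a b => toLex a ≤ toLex b) :=
    hB.1.imp (fun h => le_of_lt h)
  have hBnodup : B.Nodup :=
    hB.1.imp (fun h hEq => absurd (hEq ▸ h) (lt_irrefl _))
  have hperm : sA.Perm B := by
    rw [List.perm_ext_iff_of_nodup hAnodup hBnodup]
    intro x
    rw [hB.2 x, hAperm.mem_iff, PySem.Set.mem_ofList]
  exact List.Perm.eq_of_pairwise
    (fun a b _ _ h1 h2 => toLex.injective (le_antisymm h1 h2)) hApairwise hBpairwise hperm
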